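-- pv_equiv track=rewrite | github.com/danilonumeroso/advent_of_code | 2023/day_07/02.py | is_four_of_a_kind
-- ===== SOURCE A (Python) =====
-- def is_four_of_a_kind(hand):
--     if 'J' in hand:
--         set_hand = set(hand)
--         set_hand.remove('J')
--         breakpoint
--         return any(map(is_four_of_a_kind, [hand.replace('J', card) for card in set_hand]))
--
--     return len(set(hand)) == 2 and any(map(lambda x: hand.count(x) == 4, hand)) or \
--         (len(set(hand)) == 3 and any(map(lambda x: hand.count(x) == 3, hand)) and 'J' in hand) \
--         or (len(set(hand)) == 3 and any(map(lambda x: hand.count(x) == 2, hand)) and hand.count('J') == 2)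
-- ===== SOURCE B (Python) =====
-- def is_four_of_a_kind(hand):
--     rest = [c for c in hand if c != 'J']
--     jokers = len(hand) - len(rest)
--     vals = set(rest)
--     if len(vals) != 2:
--         return False
--     return any(rest.count(c) == 4 or rest.count(c) + jokers == 4 for c in vals)
-- ===== Notes on version B (the rewrite author's own statement) =====
-- stated objective: simpler
-- what changed: Replaces A's joker-substitution recursion (try every non-J card, recurse on the replaced hand) with a direct count-pattern test: exactly 2 distinct non-J cards and some non-J count v with v == 4 or v + jokers == 4.
import Mathlib
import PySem

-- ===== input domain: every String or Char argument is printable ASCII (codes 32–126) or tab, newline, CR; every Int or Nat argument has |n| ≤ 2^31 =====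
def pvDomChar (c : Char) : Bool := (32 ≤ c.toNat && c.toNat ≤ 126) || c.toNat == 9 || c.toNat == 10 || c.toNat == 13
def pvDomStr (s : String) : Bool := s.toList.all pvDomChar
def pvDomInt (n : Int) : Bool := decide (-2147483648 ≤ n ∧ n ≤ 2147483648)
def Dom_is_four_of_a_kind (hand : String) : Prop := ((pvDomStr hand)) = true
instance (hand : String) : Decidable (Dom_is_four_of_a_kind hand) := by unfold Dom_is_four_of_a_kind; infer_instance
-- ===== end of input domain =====

-- B replaces A's joker-substitution recursion by a direct count-pattern test (simpler; same return value everywhere).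

-- ===== PORT A =====
-- Bridge lemmas for PySem.Chars primitives applied to a SINGLE-character pattern (exact: Python's
-- 'J' in s / s.count(x) / s.replace('J', c) with 1-character arguments are membership / char count / char map).
-- They are cited by the port's termination proof, so they stay above it.
theorem pvReplGoSingle (j c : Char) : ∀ (l : List Char) (fuel : Nat) (acc : List Char), l.length ≤ fuel →
    PySem.Chars.replace.go [j] [c] fuel l acc = acc.reverse ++ l.map (fun x => if x == j then c else x) := by
  intro l
  induction l with
  | nil => intro fuel acc h; cases fuel <;> simp [PySem.Chars.replace.go]
  | cons a t ih =>
    intro fuel acc h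
    cases fuel with
    | zero => simp at h
    | succ n =>
      simp only [PySem.Chars.replace.go]
      by_cases hj : j = a
      · subst hj; simp [List.isPrefixOf, ih n _ (by simpa using h)]
      · simp [List.isPrefixOf, Ne.symm hj, ih n _ (by simpa using h), hj]

theorem pvReplSingle (j c : Char) (l : List Char) :
    PySem.Chars.replace l [j] [c] = l.map (fun x => if x == j then c else x) := by
  simp [PySem.Chars.replace, pvReplGoSingle j c l l.length [] le_rfl]

theorem pvIsInSingle (c : Char) (l : List Char) : PySem.Chars.isIn [c] l = decide (c ∈ l) := by
  rw [Bool.eq_iff_iff, PySem.Chars.isIn_iff_infix, List.singleton_infix_iff]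
  simp

-- A's recursion, on the character list of the hand.
def is_four_of_a_kind_go (l : List Char) : Bool :=
  if PySem.Chars.isIn ['J'] l then
    -- set_hand = set(hand); set_hand.remove('J')  (KeyError impossible: 'J' ∈ hand here)
    match _hrm : PySem.Set.remove? (PySem.Set.ofList l) 'J' with
    | some set_hand =>
        ((set_hand.attach.map
            (fun card => is_four_of_a_kind_go (PySem.Chars.replace l ['J'] [card.1]))).any id)
    | none => false   -- unreachable (guarded by 'J' in hand)
  else
    (decide (PySem.Set.len (PySem.Set.ofList l) = 2) && l.any (fun x => PySem.Chars.count l [x] == 4))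
    || (decide (PySem.Set.len (PySem.Set.ofList l) = 3) && l.any (fun x => PySem.Chars.count l [x] == 3)
          && PySem.Chars.isIn ['J'] l)
    || (decide (PySem.Set.len (PySem.Set.ofList l) = 3) && l.any (fun x => PySem.Chars.count l [x] == 2)
          && (PySem.Chars.count l ['J'] == 2))
termination_by l.count 'J'
decreasing_by
  rename_i hin
  have hcard : card.1 ∈ set_hand := card.2
  have hne : ¬ (card.1 == 'J') = true := by
    simp only [PySem.Set.remove?] at _hrm
    split at _hrm
    · cases _hrm
      have := List.of_mem_filter hcard
      simpa using this
    · cases _hrm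
  have hJ : 'J' ∈ l := by simpa [pvIsInSingle] using hin
  have h0 : (PySem.Chars.replace l ['J'] [card.1]).count 'J' = 0 := by
    rw [pvReplSingle]
    simp only [List.count_eq_zero, List.mem_map]
    rintro ⟨z, _, hz⟩
    by_cases hzJ : z = 'J' <;> simp [hzJ] at hz <;> simp_all
  have h1 : 0 < l.count 'J' := List.count_pos_iff.mpr hJ
  omega

def is_four_of_a_kind (hand : String) : Bool := is_four_of_a_kind_go hand.toList

-- ===== PORT B =====
def is_four_of_a_kind_alt_body (l : List Char) : Bool :=
  let rest := l.filter (fun c => !(c == 'J'))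
  let jokers : Int := (l.length : Int) - (rest.length : Int)
  let vals := PySem.Set.ofList rest
  if PySem.Set.len vals ≠ 2 then false
  else vals.any (fun c =>
    ((PySem.List.count rest c : Int) == 4) || ((PySem.List.count rest c : Int) + jokers == 4))

def is_four_of_a_kind_alt (hand : String) : Bool := is_four_of_a_kind_alt_body hand.toList

-- ===== PRECONDITION & SPEC =====
def Spec_is_four_of_a_kind (hand : String) (out : Bool) : Prop := out = is_four_of_a_kind_alt hand
instance (hand : String) (out : Bool) : Decidable (Spec_is_four_of_a_kind hand out) := by unfold Spec_is_four_of_a_kind; infer_instance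

-- ===== CLAIM (what is proved, stated in full; the proofs are below) =====
def Claim_equal_is_four_of_a_kind : Prop := ∀ (hand : String), Dom_is_four_of_a_kind hand → Spec_is_four_of_a_kind hand (is_four_of_a_kind hand)

-- ===== LEMMAS AND PROOFS =====

theorem pvCountGoSingle (c : Char) : ∀ (l : List Char) (fuel acc : Nat), l.length ≤ fuel →
    PySem.Chars.count.go [c] fuel l acc = acc + l.count c := by
  intro l
  induction l with
  | nil => intro fuel acc h; cases fuel <;> simp [PySem.Chars.count.go]
  | cons a t ih =>
    intro fuel acc h
    cases fuel with
    | zero => simp at h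
    | succ n =>
      simp only [PySem.Chars.count.go]
      by_cases hc : c = a
      · subst hc; simp [List.isPrefixOf, ih n _ (by simpa using h)]; omega
      · simp [List.isPrefixOf, Ne.symm hc, ih n _ (by simpa using h), hc]

theorem pvCountSingle (c : Char) (l : List Char) : PySem.Chars.count l [c] = l.count c := by
  simp [PySem.Chars.count, pvCountGoSingle c l l.length 0 le_rfl]



-- Counting in the hand with every 'J' replaced by `card`.
theorem pvCountRepl (l : List Char) (card x : Char) (hx : x ≠ 'J') :
    (l.map (fun z => if z == 'J' then card else z)).count x
      = (if x = card then l.count 'J' else 0) + (l.filter (fun c => !(c == 'J'))).count x := by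
  induction l with
  | nil => simp
  | cons a t ih =>
    by_cases ha : a = 'J' <;> by_cases hxc : x = card <;>
      simp [ha, hxc, hx, List.count_cons, List.count_filter,
        eq_comm (a := card) (b := x)] at ih ⊢ <;>
      omega

theorem pvMemRepl (l : List Char) (card x : Char) (hc : card ∈ l) (hcJ : card ≠ 'J') :
    (x ∈ l.map (fun z => if z == 'J' then card else z)) ↔ x ∈ l.filter (fun c => !(c == 'J')) := by
  simp only [List.mem_map, List.mem_filter, Bool.not_eq_eq_eq_not, Bool.not_true, beq_eq_false_iff_ne]
  constructor
  · rintro ⟨z, hz, rfl⟩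
    by_cases hzJ : z = 'J' <;> simp [hzJ, hc, hcJ, hz]
  · rintro ⟨hx1, hx2⟩
    exact ⟨x, hx1, by simp [hx2]⟩

theorem pvTwo (S : List Char) (h : S.Nodup) (h2 : S.length = 2) : ∃ a b, a ≠ b ∧ S = [a, b] := by
  match S, h2 with
  | [a, b], _ => exact ⟨a, b, by simp at h; exact h, rfl⟩

-- A's value on a joker-free hand.
theorem pvBase (l : List Char) (h : 'J' ∉ l) :
    is_four_of_a_kind_go l
      = (decide (PySem.Set.len (PySem.Set.ofList l) = 2) && l.any (fun x => l.count x == 4)) := by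
  rw [is_four_of_a_kind_go]
  have hc : l.count 'J' = 0 := List.count_eq_zero.mpr h
  simp [pvIsInSingle, pvCountSingle, h, hc]

set_option maxRecDepth 4096 in
theorem is_four_main (l : List Char) : is_four_of_a_kind_go l = is_four_of_a_kind_alt_body l := by
  by_cases hJ : 'J' ∈ l
  case neg =>
    rw [pvBase l hJ]
    unfold is_four_of_a_kind_alt_body
    have hrest : l.filter (fun c => !(c == 'J')) = l :=
      List.filter_eq_self.mpr (fun a ha => by simp; rintro rfl; exact hJ ha)
    simp only [hrest, sub_self]
    rcases eq_or_ne (PySem.Set.len (PySem.Set.ofList l)) 2 with h2 | h2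
    · rw [if_neg (by simp only [ne_eq, not_not]; exact h2)]
      simp only [h2, decide_true, Bool.true_and]
      rw [Bool.eq_iff_iff]
      simp only [List.any_eq_true, PySem.Set.mem_ofList, PySem.List.count_eq,
        Bool.or_eq_true, beq_iff_eq]
      constructor
      · rintro ⟨x, hx, hx4⟩
        exact ⟨x, hx, Or.inl (by omega)⟩
      · rintro ⟨x, hx, hx4⟩
        refine ⟨x, hx, ?_⟩
        rcases hx4 with h4 | h4 <;> omega
    · rw [if_pos (by exact h2)]
      have hd : decide (PySem.Set.len (PySem.Set.ofList l) = 2) = false := by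
        simpa using h2
      rw [hd, Bool.false_and]
  case pos =>
    -- shared notation and facts
    set rest := l.filter (fun c => !(c == 'J')) with hrestdef
    have hmemrest : ∀ x, x ∈ rest ↔ (x ∈ l ∧ x ≠ 'J') := by
      intro x; simp [hrestdef]
    have hnodupS : (PySem.Set.ofList rest).Nodup := PySem.Set.nodup_ofList rest
    have hmemS : ∀ x, x ∈ PySem.Set.ofList rest ↔ x ∈ rest := fun x => PySem.Set.mem_ofList rest x
    have hjok : (l.length : Int) - (rest.length : Int) = (l.count 'J' : Int) := by
      have h1 := List.length_eq_countP_add_countP (p := fun c => (c == 'J')) (l := l)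
      have he : List.countP (fun a => decide ¬(a == 'J') = true) l
          = List.countP (fun c => !(c == 'J')) l := List.countP_congr (by intro a _; simp)
      simp only [List.count] at *
      simp only [hrestdef, ← List.countP_eq_length_filter]
      omega
    have hrm : PySem.Set.remove? (PySem.Set.ofList l) 'J'
        = some ((PySem.Set.ofList l).filter (fun y => !(y == 'J'))) := by
      simp [PySem.Set.remove?, PySem.Set.discard, PySem.Set.contains, PySem.Set.mem_ofList, hJ]
    -- the candidate set A iterates over has the same membership as ofList rest
    have hmemV : ∀ x, x ∈ (PySem.Set.ofList l).filter (fun y => !(y == 'J')) ↔ x ∈ rest := by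
      intro x
      simp [List.mem_filter, PySem.Set.mem_ofList, hmemrest]
    -- A's value for each candidate card, via the joker-free base case
    have hbase : ∀ card ∈ (PySem.Set.ofList l).filter (fun y => !(y == 'J')),
        is_four_of_a_kind_go (PySem.Chars.replace l ['J'] [card])
          = (decide ((PySem.Set.len (PySem.Set.ofList rest)) = 2)
              && decide (∃ x ∈ rest, rest.count x + (if x = card then l.count 'J' else 0) = 4)) := by
      intro card hcard
      have hcl : card ∈ l ∧ card ≠ 'J' := (hmemrest card).mp ((hmemV card).mp hcard)
      rw [pvReplSingle]
      set m := l.map (fun z => if z == 'J' then card else z) with hmdef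
      have hnoJ : 'J' ∉ m := by
        simp only [hmdef, List.mem_map]
        rintro ⟨z, _, hz⟩
        by_cases hzJ : z = 'J' <;> simp [hzJ] at hz <;> simp_all [hcl.2]
      rw [pvBase m hnoJ]
      have hmm : ∀ x, x ∈ m ↔ x ∈ rest := fun x => pvMemRepl l card x hcl.1 hcl.2
      have hlen : PySem.Set.len (PySem.Set.ofList m) = PySem.Set.len (PySem.Set.ofList rest) := by
        have hperm : List.Perm (PySem.Set.ofList m) (PySem.Set.ofList rest) :=
          (List.perm_ext_iff_of_nodup (PySem.Set.nodup_ofList m) hnodupS).mpr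
            (fun x => by rw [PySem.Set.mem_ofList, PySem.Set.mem_ofList, hmm x])
        simp [PySem.Set.len, hperm.length_eq]
      rw [hlen, Bool.eq_iff_iff]
      simp only [Bool.and_eq_true, decide_eq_true_iff, List.any_eq_true, beq_iff_eq]
      apply and_congr Iff.rfl
      constructor
      · rintro ⟨x, hxm, hx4⟩
        have hxJ : x ≠ 'J' := ((hmemrest x).mp ((hmm x).mp hxm)).2
        rw [hmdef, pvCountRepl l card x hxJ] at hx4
        exact ⟨x, (hmm x).mp hxm, by rw [← hrestdef] at hx4; omega⟩
      · rintro ⟨x, hxr, hx4⟩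
        have hxJ : x ≠ 'J' := ((hmemrest x).mp hxr).2
        refine ⟨x, (hmm x).mpr hxr, ?_⟩
        rw [hmdef, pvCountRepl l card x hxJ, ← hrestdef]
        omega
    -- now both sides as existential statements
    rw [is_four_of_a_kind_go]
    simp only [pvIsInSingle, hJ, decide_true, if_true]
    split
    case _ set_hand heq =>
      rw [hrm] at heq
      injection heq with heq
      subst heq
      unfold is_four_of_a_kind_alt_body
      simp only [← hrestdef, hjok]
      rw [Bool.eq_iff_iff]
      simp only [List.any_eq_true, List.mem_attach, List.any_map, Function.comp, true_and, id]
      constructor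
      · rintro ⟨⟨card, hcard⟩, hgo⟩
        simp only [hbase card hcard, Bool.and_eq_true, decide_eq_true_iff] at hgo
        obtain ⟨hlen2, x, hxr, hx4⟩ := hgo
        have hne2 : ¬ (PySem.Set.len (PySem.Set.ofList rest) ≠ 2) := by omega
        rw [if_neg hne2]
        simp only [List.any_eq_true, Bool.or_eq_true, beq_iff_eq, PySem.List.count_eq]
        refine ⟨x, (hmemS x).mpr hxr, ?_⟩
        by_cases hxc : x = card
        · right; rw [if_pos hxc] at hx4; omega
        · left; rw [if_neg hxc] at hx4; omega
      · intro hrhs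
        split_ifs at hrhs with h2
        rw [not_not] at h2
        simp only [List.any_eq_true, Bool.or_eq_true, beq_iff_eq, PySem.List.count_eq] at hrhs
        obtain ⟨c, hcS, hc4⟩ := hrhs
        have hlenS : (PySem.Set.ofList rest).length = 2 := by
          simp [PySem.Set.len] at h2; exact_mod_cast h2
        obtain ⟨a, b, hab, hS⟩ := pvTwo (PySem.Set.ofList rest) hnodupS hlenS
        have hcr : c ∈ rest := (hmemS c).mp hcS
        rcases hc4 with h4 | h4
        · -- some non-J count is already 4: the jokers go to the OTHER card
          have hcab : c = a ∨ c = b := by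
            have hcS' := hcS; rw [hS] at hcS'; simpa using hcS'
          obtain ⟨d, hdS, hdc⟩ : ∃ d, d ∈ PySem.Set.ofList rest ∧ d ≠ c := by
            rcases hcab with rfl | rfl
            · exact ⟨b, by rw [hS]; simp, Ne.symm hab⟩
            · exact ⟨a, by rw [hS]; simp, hab⟩
          refine ⟨⟨d, (hmemV d).mpr ((hmemS d).mp hdS)⟩, ?_⟩
          rw [hbase d ((hmemV d).mpr ((hmemS d).mp hdS))]
          simp only [Bool.and_eq_true, decide_eq_true_iff]
          refine ⟨by omega, c, hcr, ?_⟩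
          rw [if_neg (fun h : c = d => hdc h.symm)]
          omega
        · -- count c plus the jokers is 4: replace the jokers by c itself
          refine ⟨⟨c, (hmemV c).mpr hcr⟩, ?_⟩
          rw [hbase c ((hmemV c).mpr hcr)]
          simp only [Bool.and_eq_true, decide_eq_true_iff]
          exact ⟨by omega, c, hcr, by rw [if_pos rfl]; omega⟩
    case _ heq =>
      rw [hrm] at heq
      cases heq


-- ===== VERDICT (by name: the statement is the Claim_ definition above) =====
theorem is_four_of_a_kind_spec : Claim_equal_is_four_of_a_kind := by
  intro hand _
  unfold Spec_is_four_of_a_kind is_four_of_a_kind is_four_of_a_kind_alt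
  exact is_four_main hand.toList
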